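-- pv_equiv track=rewrite | github.com/33shubham2021/DSA | DSA_PYTHON/dynamic_programming/longest_common_subsequence/subsequence_vs_substring.py | get_all_subarray
-- ===== SOURCE A (Python) =====
-- def get_all_subarray(s):
--     #Base
--     if (len(s) == 0):
--         return []
--     r = get_all_subarray(s[1:])
--     ans = []
--     ans.append(s[0:1])
--     for i in range(len(r)):
--         ans.append(r[i])
--         first_char = r[i][0:1]
--         if first_char == s[1:2]:
--             ans.append(s[0:1] + r[i])
--     return ans
-- ===== SOURCE B (Python) =====
-- def get_all_subarray(s):
--     ans = []
--     for k in reversed(range(len(s))):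
--         ck = s[k:k+1]
--         nxt = s[k+1:k+2]
--         ans = [ck] + [x for e in ans
--                       for x in ([e, ck + e] if e[0:1] == nxt else [e])]
--     return ans
-- ===== Notes on version B (the rewrite author's own statement) =====
-- stated objective: alternative
-- what changed: Replaces the suffix recursion (recurse on s[1:], then foldl-style appends into ans) by an iterative right-to-left index loop that rebuilds the accumulator each step with a flat list comprehension; same output, including the duplicates the e[0:1]==s[k+1:k+2] test produces.
import Mathlib
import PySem

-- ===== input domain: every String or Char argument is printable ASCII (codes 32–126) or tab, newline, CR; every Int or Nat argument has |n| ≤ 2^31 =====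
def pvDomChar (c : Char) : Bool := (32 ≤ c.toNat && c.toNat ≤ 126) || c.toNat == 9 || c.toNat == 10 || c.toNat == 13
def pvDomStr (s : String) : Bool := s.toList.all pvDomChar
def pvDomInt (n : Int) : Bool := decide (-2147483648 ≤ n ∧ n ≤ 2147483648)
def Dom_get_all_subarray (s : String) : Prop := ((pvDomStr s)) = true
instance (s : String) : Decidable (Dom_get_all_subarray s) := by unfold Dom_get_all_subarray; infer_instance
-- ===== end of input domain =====

-- B replaces A's suffix recursion by an iterative reversed-index loop with a flat
-- comprehension rebuilding the accumulator; same value everywhere (objective: alternative).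

-- ===== PORT A =====
-- A, recursively on the characters of s (s[1:] = tail, s[0:1] = head as a string,
-- s[1:2] = first char of the tail as a string; all slices here are exact list take/drop).
def getAllA : List Char → List String
  | [] => []
  | c :: rest =>
    let r := getAllA rest
    let ans : List String := []
    let ans := ans ++ [String.mk [c]]
    r.foldl (fun ans e =>
      let ans := ans ++ [e]
      let first_char := String.mk (e.toList.take 1)
      if first_char = String.mk (rest.take 1) then ans ++ [String.mk [c] ++ e] else ans) ans

def get_all_subarray (s : String) : List String := getAllA s.toList

-- ===== PORT B =====
-- Source B: ans = []; for k in reversed(range(len(s))): ans = [s[k:k+1]] + comprehension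
def get_all_subarray_alt (s : String) : List String :=
  let cs := s.toList
  ((List.range cs.length).reverse).foldl
    (fun ans k =>
      let ck := String.mk ((cs.drop k).take 1)
      let nxt := String.mk ((cs.drop (k+1)).take 1)
      ck :: ans.flatMap (fun e =>
        if String.mk (e.toList.take 1) = nxt then [e, ck ++ e] else [e]))
    []

-- ===== PRECONDITION & SPEC =====
def Spec_get_all_subarray (s : String) (out : List String) : Prop := out = get_all_subarray_alt s
instance (s : String) (out : List String) : Decidable (Spec_get_all_subarray s out) := by unfold Spec_get_all_subarray; infer_instance

-- ===== CLAIM (what is proved, stated in full; the proofs are below) =====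
def Claim_equal_get_all_subarray : Prop := ∀ (s : String), Dom_get_all_subarray s → Spec_get_all_subarray s (get_all_subarray s)

-- ===== LEMMAS AND PROOFS =====

-- A's inner append loop is the cons/flatMap form B uses.
theorem foldl_append_flatMap (c : Char) (t : List Char) :
    ∀ (r init : List String),
    r.foldl (fun ans e =>
      let ans := ans ++ [e]
      let first_char := String.mk (e.toList.take 1)
      if first_char = String.mk (t.take 1) then ans ++ [String.mk [c] ++ e] else ans) init
    = init ++ r.flatMap (fun e =>
        if String.mk (e.toList.take 1) = String.mk (t.take 1)
        then [e, String.mk [c] ++ e] else [e]) := by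
  intro r
  induction r with
  | nil => simp
  | cons e r ih =>
    intro init
    simp only [List.foldl_cons, List.flatMap_cons]
    rw [ih]
    split <;> simp

-- B's reversed-range fold computes A's recursion on each suffix.
theorem foldr_range'_eq (cs : List Char) :
    ∀ (n j : Nat), j + n = cs.length →
    (List.range' j n).foldr
      (fun k ans =>
        let ck := String.mk ((cs.drop k).take 1)
        let nxt := String.mk ((cs.drop (k+1)).take 1)
        ck :: ans.flatMap (fun e =>
          if String.mk (e.toList.take 1) = nxt then [e, ck ++ e] else [e]))
      []
    = getAllA (cs.drop j) := by
  intro n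
  induction n with
  | zero =>
    intro j hj
    simp at hj
    simp [hj, getAllA]
  | succ n ih =>
    intro j hj
    have hjlt : j < cs.length := by omega
    have hdrop : cs.drop j = cs[j] :: cs.drop (j+1) := (List.getElem_cons_drop hjlt).symm
    rw [List.range'_succ, List.foldr_cons, ih (j+1) (by omega)]
    simp only [hdrop]
    rw [getAllA]
    simp only []
    rw [foldl_append_flatMap]
    simp [List.take]

-- ===== VERDICT (by name: the statement is the Claim_ definition above) =====
theorem get_all_subarray_spec : Claim_equal_get_all_subarray := by
  intro s _
  unfold Spec_get_all_subarray get_all_subarray get_all_subarray_alt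
  simp only [List.foldl_reverse, List.range_eq_range']
  have := foldr_range'_eq s.toList s.toList.length 0 (by omega)
  simp only [List.drop_zero] at this
  rw [← this]
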